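-- pv_equiv track=rewrite | github.com/yamate11/compprog | abc/abc094/b/q2.py | solve
-- ===== SOURCE A (Python) =====
-- def solve(n, m, x, aa):
--     left = 0
--     right = 0
--     on_left = True
--     for i in range(n):
--         if i in aa:
--             if on_left:
--                 left += 1
--             else:
--                 right += 1
--         if i == x:
--             on_left = False
--     if left < right:
--         return left
--     else:
--         return right
-- ===== SOURCE B (Python) =====
-- def solve(n, m, x, aa):
--     gates = {a for a in aa if 0 <= a < n}
--     left = sum(1 for a in gates if a <= x)
--     return min(left, len(gates) - left)
-- ===== Notes on version B (the rewrite author's own statement) =====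
-- stated objective: faster
-- what changed: Replace the scan over range(n) with an O(n*m) membership test per step by a single pass over aa: build the set of valid gate positions once and count those <= x, returning min(left, len(gates)-left).
import Mathlib
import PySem

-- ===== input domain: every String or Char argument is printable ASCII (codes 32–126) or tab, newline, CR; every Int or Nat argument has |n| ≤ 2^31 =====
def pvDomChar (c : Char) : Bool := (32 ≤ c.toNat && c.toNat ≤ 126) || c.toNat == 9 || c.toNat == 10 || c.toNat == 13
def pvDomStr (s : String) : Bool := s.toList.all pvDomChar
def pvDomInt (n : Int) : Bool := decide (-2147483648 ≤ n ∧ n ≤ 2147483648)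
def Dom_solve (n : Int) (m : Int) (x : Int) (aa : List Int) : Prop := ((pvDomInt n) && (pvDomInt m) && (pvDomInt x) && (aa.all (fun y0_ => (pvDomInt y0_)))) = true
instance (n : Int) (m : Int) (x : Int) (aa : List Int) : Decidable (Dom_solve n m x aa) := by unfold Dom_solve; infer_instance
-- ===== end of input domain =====

-- B replaces A's O(n*m) scan over range(n) (list membership each step) by one pass over aa:
-- build the set of valid gates once and count those ≤ x; objective: faster (asymptotic).


-- ===== PORT A =====
def solve (n : Int) (m : Int) (x : Int) (aa : List Int) : Int :=
  let st :=
    (PySem.List.pyRange 0 n 1).foldl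
      (fun (st : Int × Int × Bool) (i : Int) =>
        let st2 :=
          if aa.contains i then
            (if st.2.2 then (st.1 + 1, st.2.1, st.2.2) else (st.1, st.2.1 + 1, st.2.2))
          else st
        if i == x then (st2.1, st2.2.1, false) else st2)
      (0, 0, true)
  if st.1 < st.2.1 then st.1 else st.2.1

-- ===== PORT B =====
def solve_alt (n : Int) (m : Int) (x : Int) (aa : List Int) : Int :=
  let gates : PySem.Set Int := PySem.Set.ofList (aa.filter (fun a => decide (0 ≤ a) && decide (a < n)))
  let left : Int := (gates.countP (fun a => decide (a ≤ x)) : Int)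
  min left ((gates.length : Int) - left)

-- ===== PRECONDITION & SPEC =====
def Spec_solve (n : Int) (m : Int) (x : Int) (aa : List Int) (out : Int) : Prop := out = solve_alt n m x aa
instance (n : Int) (m : Int) (x : Int) (aa : List Int) (out : Int) : Decidable (Spec_solve n m x aa out) := by unfold Spec_solve; infer_instance

-- ===== CLAIM (what is proved, stated in full; the proofs are below) =====
def Claim_equal_solve : Prop := ∀ (n : Int) (m : Int) (x : Int) (aa : List Int), Dom_solve n m x aa → Spec_solve n m x aa (solve n m x aa)

-- ===== LEMMAS AND PROOFS =====

-- A's loop over range(k) computes the two membership counts, split at the step where i == x.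
lemma foldA (aa : List Int) (x : Int) (k : Nat) :
    (PySem.List.pyRange 0 (k : Int) 1).foldl
      (fun (st : Int × Int × Bool) (i : Int) =>
        let st2 :=
          if aa.contains i then
            (if st.2.2 then (st.1 + 1, st.2.1, st.2.2) else (st.1, st.2.1 + 1, st.2.2))
          else st
        if i == x then (st2.1, st2.2.1, false) else st2)
      (0, 0, true) =
    ( ((PySem.List.pyRange 0 (k : Int) 1).countP
        (fun i => aa.contains i && (decide (x < 0) || decide (i ≤ x))) : Int),
      ((PySem.List.pyRange 0 (k : Int) 1).countP
        (fun i => aa.contains i && !(decide (x < 0) || decide (i ≤ x))) : Int),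
      decide (¬ (0 ≤ x ∧ x < k)) ) := by
  induction k with
  | zero =>
      simp [PySem.List.pyRange_one_eq_nil (le_refl (0 : Int))]
  | succ k ih =>
      have hsplit : PySem.List.pyRange 0 ((k + 1 : Nat) : Int) 1
          = PySem.List.pyRange 0 (k : Int) 1 ++ [(k : Int)] := by
        have := PySem.List.pyRange_one_succ_right (a := 0) (b := (k : Int)) (by omega)
        push_cast
        exact this
      have hck : (decide (x < 0) || decide ((k : Int) ≤ x))
          = decide (¬ (0 ≤ x ∧ x < (k : Int))) := by
        by_cases h : 0 ≤ x ∧ x < (k : Int) <;> simp [h] <;> omega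
      rw [hsplit, List.foldl_append, ih]
      simp only [List.foldl_cons, List.foldl_nil, List.countP_append, List.countP_cons,
        List.countP_nil, beq_iff_eq, hck]
      by_cases hm : aa.contains ((k : Nat) : Int) <;>
      by_cases hx : ((k : Nat) : Int) = x <;>
      by_cases hb : 0 ≤ x ∧ x < ((k : Nat) : Int) <;>
        simp [hm, hx, hb, Prod.ext_iff] <;>
        (first | omega | (constructor <;> omega) | (refine ⟨?_, ?_, ?_⟩ <;> omega) | simp_all <;> omega)

lemma rangeNorm (n : Int) :
    PySem.List.pyRange 0 n 1 = PySem.List.pyRange 0 ((n.toNat : Nat) : Int) 1 := by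
  rcases (show 0 ≤ n ∨ n < 0 by omega) with h | h
  · rw [Int.toNat_of_nonneg h]
  · rw [PySem.List.pyRange_one_eq_nil (by omega), PySem.List.pyRange_one_eq_nil (by omega)]

-- ===== VERDICT (by name: the statement is the Claim_ definition above) =====
theorem solve_spec : Claim_equal_solve := by
  intro n m x aa _
  unfold Spec_solve solve solve_alt
  rw [rangeNorm, foldA]
  set k : Nat := n.toNat with hk
  set F : List Int := (PySem.List.pyRange 0 (k : Int) 1).filter (fun i => aa.contains i) with hF
  set g : PySem.Set Int :=
    PySem.Set.ofList (aa.filter (fun a => decide (0 ≤ a) && decide (a < n))) with hg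
  have hFnodup : F.Nodup := by
    rw [hF]; exact List.Nodup.filter _ (PySem.List.nodup_pyRange_one 0 ((k : Nat) : Int))
  have hgnodup : g.Nodup := by rw [hg]; exact PySem.Set.nodup_ofList _
  have hperm : F.Perm g := by
    rw [List.perm_ext_iff_of_nodup hFnodup hgnodup]
    intro a
    simp [hF, hg, PySem.Set.mem_ofList, List.mem_filter, PySem.List.mem_pyRange_one]
    constructor
    · rintro ⟨⟨h0, h1⟩, h2⟩; exact ⟨h2, h0, by omega⟩
    · rintro ⟨h2, h0, h1⟩; exact ⟨⟨h0, by omega⟩, h2⟩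
  have hcount : ∀ p : Int → Bool,
      (PySem.List.pyRange 0 (k : Int) 1).countP (fun i => aa.contains i && p i)
        = g.countP p := by
    intro p
    have h1 : (PySem.List.pyRange 0 (k : Int) 1).countP (fun i => aa.contains i && p i)
        = F.countP p := by
      rw [hF, List.countP_filter]
      congr 1
      funext i
      exact Bool.and_comm _ _
    rw [h1, hperm.countP_eq]
  rw [hcount, hcount]
  by_cases hx : x < 0
  · have hL : g.countP (fun a => decide (a ≤ x)) = 0 := by
      rw [List.countP_eq_zero]
      intro a ha
      rw [hg] at ha
      have ha' := (PySem.Set.mem_ofList _ _).mp ha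
      simp only [List.mem_filter, Bool.and_eq_true, decide_eq_true_eq] at ha'
      simp only [decide_eq_true_eq]
      omega
    have hT : (fun i => decide (x < 0) || decide (i ≤ x)) = fun _ : Int => true := by
      funext i; simp [hx]
    have hN : (fun i : Int => !(decide (x < 0) || decide (i ≤ x))) = fun _ : Int => false := by
      funext i; simp [hx]
    rw [hT, hN]
    simp [hL]
  · have hT : (fun i => decide (x < 0) || decide (i ≤ x)) = fun i : Int => decide (i ≤ x) := by
      funext i; simp [hx]
    have hN : (fun i : Int => !(decide (x < 0) || decide (i ≤ x))) = fun i : Int => !(decide (i ≤ x)) := by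
      funext i; simp [hx]
    rw [hT, hN]
    have hsum : g.countP (fun i : Int => decide (i ≤ x))
        + g.countP (fun i : Int => !(decide (i ≤ x))) = g.length := by
      have h := List.length_eq_countP_add_countP (p := fun i : Int => decide (i ≤ x)) (l := g)
      have he : (fun i : Int => decide (¬ (decide (i ≤ x) = true)))
          = (fun i : Int => !(decide (i ≤ x))) := by
        funext i; by_cases hA : i ≤ x <;> simp [hA]
      rw [he] at h
      omega
    simp only []
    split_ifs <;> omega
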